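-- pv_equiv track=rewrite | github.com/vocalfreak/WINpass-7-05 | utils/route_utils.py | get_timeslot_status
-- ===== SOURCE A (Python) =====
-- def get_timeslot_status(timeslots):
--     timeslots_status = []
--     for count in timeslots:
--         if count < 2:
--             timeslots_status.append("green")
--         elif count < 5:
--             timeslots_status.append("yellow")
--         else:
--             timeslots_status.append("red")
--     return timeslots_status
-- ===== SOURCE B (Python) =====
-- def get_timeslot_status(timeslots):
--     # Painter's algorithm: start everything at the worst label, then refine
--     # in two staged overwrite passes (never branches three ways per element).
--     status = ["red"] * len(timeslots)
--     for i, count in enumerate(timeslots):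
--         if count < 5:
--             status[i] = "yellow"
--     for i, count in enumerate(timeslots):
--         if count < 2:
--             status[i] = "green"
--     return status
-- ===== Notes on version B (the rewrite author's own statement) =====
-- stated objective: alternative
-- what changed: Replaces the single pass with a chained if/elif by a painter's algorithm: pre-fill the output with the worst label 'red', then two staged overwrite passes downgrade entries below each threshold ('<5' to yellow, then '<2' to green), so no element is ever classified by a three-way branch.
import Mathlib
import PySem

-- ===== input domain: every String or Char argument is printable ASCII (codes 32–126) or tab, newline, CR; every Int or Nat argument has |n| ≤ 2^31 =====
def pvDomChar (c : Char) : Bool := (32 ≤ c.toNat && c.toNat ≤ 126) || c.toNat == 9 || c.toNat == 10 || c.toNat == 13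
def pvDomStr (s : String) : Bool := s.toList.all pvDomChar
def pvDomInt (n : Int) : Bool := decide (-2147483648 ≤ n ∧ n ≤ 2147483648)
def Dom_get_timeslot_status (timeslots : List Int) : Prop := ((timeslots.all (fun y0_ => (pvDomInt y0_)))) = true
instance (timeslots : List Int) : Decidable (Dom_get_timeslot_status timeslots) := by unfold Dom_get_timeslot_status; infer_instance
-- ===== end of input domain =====

-- B replaces A's single-pass chained if/elif with a painter's algorithm: fill with "red", then two staged overwrite passes (alternative decomposition, same cost).

-- ===== PORT A =====
def get_timeslot_status (timeslots : List Int) : List String :=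
  timeslots.foldl (fun timeslots_status count =>
    if count < 2 then timeslots_status ++ ["green"]
    else if count < 5 then timeslots_status ++ ["yellow"]
    else timeslots_status ++ ["red"]) []

-- ===== PORT B =====
-- status[i] = v with i from enumerate (always in range): PySem.List.pySetD is exact there.
def get_timeslot_status_alt (timeslots : List Int) : List String :=
  let status := List.replicate timeslots.length "red"
  let status := (PySem.List.enumerate timeslots).foldl
    (fun st p => if p.2 < 5 then PySem.List.pySetD st p.1 "yellow" else st) status
  (PySem.List.enumerate timeslots).foldl
    (fun st p => if p.2 < 2 then PySem.List.pySetD st p.1 "green" else st) status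

-- ===== PRECONDITION & SPEC =====
def Spec_get_timeslot_status (timeslots : List Int) (out : List String) : Prop :=
  out = get_timeslot_status_alt timeslots
instance (timeslots : List Int) (out : List String) : Decidable (Spec_get_timeslot_status timeslots out) := by
  unfold Spec_get_timeslot_status; infer_instance

-- ===== CLAIM =====
def Claim_equal_get_timeslot_status : Prop :=
  ∀ (timeslots : List Int), Dom_get_timeslot_status timeslots →
    Spec_get_timeslot_status timeslots (get_timeslot_status timeslots)

-- ===== LEMMAS AND PROOFS =====

-- One overwrite pass over 'enumerate ts pre.length' acting on 'pre ++ zs' rewrites zs pointwise.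
lemma gts_pass (P : Int → Bool) (v : String) (ts : List Int) (pre zs : List String)
    (h : zs.length = ts.length) :
    (PySem.List.enumerate ts (pre.length : Int)).foldl
      (fun st p => if P p.2 then PySem.List.pySetD st p.1 v else st) (pre ++ zs)
      = pre ++ List.zipWith (fun c z => if P c then v else z) ts zs := by
  induction ts generalizing pre zs with
  | nil => simp at h; simp [h, PySem.List.enumerate_nil]
  | cons c cs ih =>
    cases zs with
    | nil => simp at h
    | cons z zs' =>
      simp only [PySem.List.enumerate_cons, List.foldl_cons, List.zipWith_cons_cons]
      have hset : PySem.List.pySetD (pre ++ z :: zs') (pre.length : Int) v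
          = pre ++ v :: zs' := by
        rw [show ((pre.length : Int)) = ((pre.length : Nat) : Int) from rfl,
          PySem.List.pySetD_natCast]
        simp [List.set_append_right, Nat.sub_self]
      have key : ∀ w : String,
          (PySem.List.enumerate cs ((pre.length : Int) + 1)).foldl
            (fun st p => if P p.2 then PySem.List.pySetD st p.1 v else st) (pre ++ w :: zs')
          = pre ++ w :: List.zipWith (fun c z => if P c then v else z) cs zs' := by
        intro w
        have := ih (pre ++ [w]) zs' (by simpa using h)
        simpa [List.append_assoc, List.length_append, add_comm] using this
      by_cases hp : P c = true
      · rw [if_pos hp, hset, key v]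
        simp [hp]
      · rw [if_neg hp, key z]
        simp [hp]

lemma gts_zip_zip (ts : List Int) :
    List.zipWith (fun c z => if c < 2 then "green" else z) ts
      (List.zipWith (fun c z => if c < 5 then "yellow" else z) ts (List.replicate ts.length "red"))
      = ts.map (fun c => if c < 2 then "green" else if c < 5 then "yellow" else "red") := by
  induction ts with
  | nil => rfl
  | cons c cs ih =>
    simp only [List.length_cons, List.replicate_succ, List.zipWith_cons_cons, List.map_cons]
    rw [ih]

lemma gts_two_passes (ts : List Int) :
    get_timeslot_status_alt ts
      = ts.map (fun c => if c < 2 then "green" else if c < 5 then "yellow" else "red") := by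
  simp only [get_timeslot_status_alt]
  have h1 := gts_pass (fun c => decide (c < 5)) "yellow" ts [] (List.replicate ts.length "red")
    (by simp)
  have h2 := gts_pass (fun c => decide (c < 2)) "green" ts []
    (List.zipWith (fun c z => if decide (c < 5) then "yellow" else z) ts (List.replicate ts.length "red"))
    (by simp)
  simp only [List.length_nil, Int.natCast_zero, List.nil_append, decide_eq_true_eq] at h1 h2
  rw [h1, h2, gts_zip_zip]

lemma gts_foldl_acc (ts : List Int) (acc : List String) :
    ts.foldl (fun st count =>
      if count < 2 then st ++ ["green"]
      else if count < 5 then st ++ ["yellow"]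
      else st ++ ["red"]) acc
      = acc ++ ts.map (fun c => if c < 2 then "green" else if c < 5 then "yellow" else "red") := by
  induction ts generalizing acc with
  | nil => simp
  | cons c cs ih =>
    simp only [List.foldl_cons, List.map_cons]
    by_cases h2 : c < 2
    · rw [if_pos h2, if_pos h2, ih]; simp
    · by_cases h5 : c < 5
      · rw [if_neg h2, if_pos h5, if_neg h2, if_pos h5, ih]; simp
      · rw [if_neg h2, if_neg h5, if_neg h2, if_neg h5, ih]; simp

-- ===== VERDICT =====
theorem get_timeslot_status_spec : Claim_equal_get_timeslot_status := by
  intro ts _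
  unfold Spec_get_timeslot_status get_timeslot_status
  rw [gts_two_passes, gts_foldl_acc]
  simp
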